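-- pv_equiv track=rewrite | github.com/tariel15/GOA | level 084/homework/codwars2.py | fruit
-- ===== SOURCE A (Python) =====
-- SCORES = {'Wild': 10, 'Star': 9, 'Bell': 8, 'Shell': 7, 'Seven': 6,
--           'Cherry': 5, 'Bar': 4, 'King': 3, 'Queen': 2, 'Jack': 1 }
--
-- def fruit(reels, spins):
--     result = sorted( reels[i][spins[i]] for i in range(3) )
--
--     if len(set(result)) == 1:
--         return SCORES[result[0]] * 10
--
--     elif len(set(result)) == 2:
--         return SCORES[result[1]] * ((result[1] != result[2] == 'Wild') + 1)
--
--     else: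
--         return 0
-- ===== SOURCE B (Python) =====
-- SCORES = {'Wild': 10, 'Star': 9, 'Bell': 8, 'Shell': 7, 'Seven': 6,
--           'Cherry': 5, 'Bar': 4, 'King': 3, 'Queen': 2, 'Jack': 1 }
--
-- def fruit(reels, spins):
--     a = reels[0][spins[0]]
--     b = reels[1][spins[1]]
--     c = reels[2][spins[2]]
--     if a == b == c:
--         return SCORES[a] * 10
--     if a == b or a == c:
--         dup, other = a, (c if a == b else b)
--     elif b == c:
--         dup, other = b, a
--     else:
--         return 0
--     return SCORES[dup] * (2 if other == 'Wild' else 1)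
-- ===== Notes on version B (the rewrite author's own statement) =====
-- stated objective: simpler
-- what changed: B drops the sort/set/positional-index classification entirely: it branches directly on the pairwise equalities of the three symbols (three-of-a-kind, pair with explicit single symbol, all distinct) and tests the Wild bonus on the single symbol explicitly instead of relying on 'Wild' sorting last.
import Mathlib
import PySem

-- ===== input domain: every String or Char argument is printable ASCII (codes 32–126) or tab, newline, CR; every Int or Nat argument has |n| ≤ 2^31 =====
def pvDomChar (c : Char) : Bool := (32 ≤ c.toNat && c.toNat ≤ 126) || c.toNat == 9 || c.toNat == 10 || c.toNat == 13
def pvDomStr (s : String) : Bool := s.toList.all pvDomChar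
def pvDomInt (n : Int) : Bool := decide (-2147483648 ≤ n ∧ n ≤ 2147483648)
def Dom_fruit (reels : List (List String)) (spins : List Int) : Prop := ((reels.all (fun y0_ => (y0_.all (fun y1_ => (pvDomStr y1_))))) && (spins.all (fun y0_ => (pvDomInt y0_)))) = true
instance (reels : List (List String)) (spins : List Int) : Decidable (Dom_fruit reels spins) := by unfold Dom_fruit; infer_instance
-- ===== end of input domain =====

-- B replaces A's sort-then-index classification by direct count-based branching on the three
-- symbols' pairwise equalities, detecting the Wild bonus explicitly (objective: simpler).

-- ===== PORT A =====
def pvScores : PySem.Dict String Int := PySem.Dict.ofList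
  [("Wild",10),("Star",9),("Bell",8),("Shell",7),("Seven",6),("Cherry",5),("Bar",4),("King",3),("Queen",2),("Jack",1)]

def pvGetSym (reels : List (List String)) (spins : List Int) (i : Int) : String :=
  PySem.List.pyGetD (PySem.List.pyGetD reels i []) (PySem.List.pyGetD spins i 0) ""

def fruit (reels : List (List String)) (spins : List Int) : Int :=
  let result := PySem.List.sorted ((PySem.List.pyRange 0 3 1).map (fun i => pvGetSym reels spins i)) (fun s => s) false
  if PySem.Set.len (PySem.Set.ofList result) = 1 then
    PySem.Dict.getD pvScores (PySem.List.pyGetD result 0 "") 0 * 10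
  else if PySem.Set.len (PySem.Set.ofList result) = 2 then
    PySem.Dict.getD pvScores (PySem.List.pyGetD result 1 "") 0 *
      ((if PySem.List.pyGetD result 1 "" ≠ PySem.List.pyGetD result 2 "" ∧ PySem.List.pyGetD result 2 "" = "Wild" then (1:Int) else 0) + 1)
  else 0

-- ===== PORT B =====
def fruit_alt (reels : List (List String)) (spins : List Int) : Int :=
  let a := PySem.List.pyGetD (PySem.List.pyGetD reels 0 []) (PySem.List.pyGetD spins 0 0) ""
  let b := PySem.List.pyGetD (PySem.List.pyGetD reels 1 []) (PySem.List.pyGetD spins 1 0) ""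
  let c := PySem.List.pyGetD (PySem.List.pyGetD reels 2 []) (PySem.List.pyGetD spins 2 0) ""
  if a = b ∧ b = c then PySem.Dict.getD pvScores a 0 * 10
  else if a = b ∨ a = c then
    PySem.Dict.getD pvScores a 0 * (if (if a = b then c else b) = "Wild" then 2 else 1)
  else if b = c then
    PySem.Dict.getD pvScores b 0 * (if a = "Wild" then 2 else 1)
  else 0

-- ===== PRECONDITION & SPEC =====
-- Pre_ excludes exactly the inputs where the Python A raises: IndexError (fewer than 3 reels or
-- spins, or a spin index out of its reel's range) and KeyError (a duplicated symbol outside SCORES).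
def Pre_fruit (reels : List (List String)) (spins : List Int) : Prop :=
  3 ≤ reels.length ∧ 3 ≤ spins.length ∧
  (∀ i ∈ ([0, 1, 2] : List Int),
    PySem.Raise.InRange (PySem.List.pyGetD reels i []).length (PySem.List.pyGetD spins i 0)) ∧
  ((pvGetSym reels spins 0 = pvGetSym reels spins 1 ∨ pvGetSym reels spins 0 = pvGetSym reels spins 2 →
      pvScores.contains (pvGetSym reels spins 0) = true) ∧
   (pvGetSym reels spins 1 = pvGetSym reels spins 2 → pvScores.contains (pvGetSym reels spins 1) = true))
instance (reels : List (List String)) (spins : List Int) : Decidable (Pre_fruit reels spins) := by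
  unfold Pre_fruit; infer_instance

def pvWitness_fruit : List (List String) × List Int := ([["Wild"], ["Star"], ["Bell"]], [0, 0, 0])

def Spec_fruit (reels : List (List String)) (spins : List Int) (out : Int) : Prop := out = fruit_alt reels spins
instance (reels : List (List String)) (spins : List Int) (out : Int) : Decidable (Spec_fruit reels spins out) := by unfold Spec_fruit; infer_instance

-- ===== CLAIM (what is proved, stated in full; the proofs are below) =====
def Claim_equal_fruit : Prop := ∀ (reels : List (List String)) (spins : List Int), Dom_fruit reels spins → Pre_fruit reels spins → Spec_fruit reels spins (fruit reels spins)

-- ===== LEMMAS AND PROOFS =====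

-- A's score computation on the three extracted symbols.
def pvA (x y z : String) : Int :=
  let result := PySem.List.sorted [x, y, z] (fun s => s) false
  if PySem.Set.len (PySem.Set.ofList result) = 1 then
    PySem.Dict.getD pvScores (PySem.List.pyGetD result 0 "") 0 * 10
  else if PySem.Set.len (PySem.Set.ofList result) = 2 then
    PySem.Dict.getD pvScores (PySem.List.pyGetD result 1 "") 0 *
      ((if PySem.List.pyGetD result 1 "" ≠ PySem.List.pyGetD result 2 "" ∧ PySem.List.pyGetD result 2 "" = "Wild" then (1:Int) else 0) + 1)
  else 0

-- B's score computation on the three extracted symbols.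
def pvB (x y z : String) : Int :=
  if x = y ∧ y = z then PySem.Dict.getD pvScores x 0 * 10
  else if x = y ∨ x = z then
    PySem.Dict.getD pvScores x 0 * (if (if x = y then z else y) = "Wild" then 2 else 1)
  else if y = z then
    PySem.Dict.getD pvScores y 0 * (if x = "Wild" then 2 else 1)
  else 0

theorem fruit_eq_pvA (reels : List (List String)) (spins : List Int) :
    fruit reels spins = pvA (pvGetSym reels spins 0) (pvGetSym reels spins 1) (pvGetSym reels spins 2) := rfl

theorem fruit_alt_eq_pvB (reels : List (List String)) (spins : List Int) :
    fruit_alt reels spins = pvB (pvGetSym reels spins 0) (pvGetSym reels spins 1) (pvGetSym reels spins 2) := rfl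

theorem pvScores_mk : pvScores = PySem.Dict.mk
  [("Wild",10),("Star",9),("Bell",8),("Shell",7),("Seven",6),("Cherry",5),("Bar",4),("King",3),("Queen",2),("Jack",1)] := by decide

-- Every SCORES key is ≤ "Wild", so a string above "Wild" scores 0.
theorem pvScores_big (x : String) (h : "Wild" < x) : PySem.Dict.getD pvScores x 0 = 0 := by
  have H : ∀ (k : String), k ≤ "Wild" → (k == x) = false := by
    intro k hk
    simp only [beq_eq_false_iff_ne]
    exact ne_of_lt (lt_of_le_of_lt hk h)
  have lt : ∀ k : String, k.toList < "Wild".toList → k ≤ "Wild" := by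
    intro k hk; exact le_of_lt (by rw [String.lt_iff_toList_lt]; exact hk)
  rw [pvScores_mk]
  simp [PySem.Dict.getD, PySem.Dict.get?, List.find?, H _ le_rfl,
    H "Star" (lt _ (by decide)), H "Bell" (lt _ (by decide)), H "Shell" (lt _ (by decide)),
    H "Seven" (lt _ (by decide)), H "Cherry" (lt _ (by decide)), H "Bar" (lt _ (by decide)),
    H "King" (lt _ (by decide)), H "Queen" (lt _ (by decide)), H "Jack" (lt _ (by decide))]

theorem pvAB (x y z : String) : pvA x y z = pvB x y z := by
  by_cases hxy : x = y
  · subst hxy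
    by_cases hxz : x = z
    · -- all three equal
      subst hxz
      have hs : PySem.List.sorted [x, x, x] (fun s : String => s) false = [x, x, x] :=
        PySem.List.sorted_id_eq_of_perm_of_pairwise _ _ (List.Perm.refl _) (by simp)
      simp [pvA, pvB, hs, PySem.Set.ofList, PySem.Set.add, PySem.Set.contains,
        PySem.List.pyGetD, PySem.List.pyGet?, PySem.List.pyIdx?]
    · -- x = y ≠ z : duplicate x, single z
      rcases lt_or_gt_of_ne hxz with hlt | hgt
      · have hs : PySem.List.sorted [x, x, z] (fun s : String => s) false = [x, x, z] :=
          PySem.List.sorted_id_eq_of_perm_of_pairwise _ _ (List.Perm.refl _)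
            (by simp [String.le_iff_toList_le.mp hlt.le])
        by_cases hzw : z = "Wild"
        · subst hzw
          simp [pvA, pvB, hs, PySem.Set.ofList, PySem.Set.add, PySem.Set.contains,
            PySem.List.pyGetD, PySem.List.pyGet?, PySem.List.pyIdx?, hxz, Ne.symm hxz]
        · simp [pvA, pvB, hs, PySem.Set.ofList, PySem.Set.add, PySem.Set.contains,
            PySem.List.pyGetD, PySem.List.pyGet?, PySem.List.pyIdx?, hxz, Ne.symm hxz, hzw]
      · have hs : PySem.List.sorted [x, x, z] (fun s : String => s) false = [z, x, x] :=
          PySem.List.sorted_id_eq_of_perm_of_pairwise _ _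
            (by simpa using List.perm_append_comm (l₁ := [z]) (l₂ := [x, x]))
            (by simp [String.le_iff_toList_le.mp hgt.le])
        by_cases hzw : z = "Wild"
        · subst hzw
          simp [pvA, pvB, hs, PySem.Set.ofList, PySem.Set.add, PySem.Set.contains,
            PySem.List.pyGetD, PySem.List.pyGet?, PySem.List.pyIdx?, hxz,
            pvScores_big x hgt]
        · simp [pvA, pvB, hs, PySem.Set.ofList, PySem.Set.add, PySem.Set.contains,
            PySem.List.pyGetD, PySem.List.pyGet?, PySem.List.pyIdx?, hxz,  hzw]
  · by_cases hxz : x = z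
    · -- x = z ≠ y : duplicate x, single y
      subst hxz
      rcases lt_or_gt_of_ne hxy with hlt | hgt
      · have hs : PySem.List.sorted [x, y, x] (fun s : String => s) false = [x, x, y] :=
          PySem.List.sorted_id_eq_of_perm_of_pairwise _ _
            (List.Perm.cons x (List.Perm.swap y x [])) (by simp [String.le_iff_toList_le.mp hlt.le])
        by_cases hyw : y = "Wild"
        · subst hyw
          simp [pvA, pvB, hs, PySem.Set.ofList, PySem.Set.add, PySem.Set.contains,
            PySem.List.pyGetD, PySem.List.pyGet?, PySem.List.pyIdx?, hxy, Ne.symm hxy]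
        · simp [pvA, pvB, hs, PySem.Set.ofList, PySem.Set.add, PySem.Set.contains,
            PySem.List.pyGetD, PySem.List.pyGet?, PySem.List.pyIdx?, hxy, Ne.symm hxy, hyw]
      · have hs : PySem.List.sorted [x, y, x] (fun s : String => s) false = [y, x, x] :=
          PySem.List.sorted_id_eq_of_perm_of_pairwise _ _ (List.Perm.swap x y [x])
            (by simp [String.le_iff_toList_le.mp hgt.le])
        by_cases hyw : y = "Wild"
        · subst hyw
          simp [pvA, pvB, hs, PySem.Set.ofList, PySem.Set.add, PySem.Set.contains,
            PySem.List.pyGetD, PySem.List.pyGet?, PySem.List.pyIdx?, hxy, Ne.symm hxy,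
            pvScores_big x hgt]
        · simp [pvA, pvB, hs, PySem.Set.ofList, PySem.Set.add, PySem.Set.contains,
            PySem.List.pyGetD, PySem.List.pyGet?, PySem.List.pyIdx?, hxy, Ne.symm hxy, hyw]
    · by_cases hyz : y = z
      · -- y = z ≠ x : duplicate y, single x
        subst hyz
        rcases lt_or_gt_of_ne hxy with hlt | hgt
        · have hs : PySem.List.sorted [x, y, y] (fun s : String => s) false = [x, y, y] :=
            PySem.List.sorted_id_eq_of_perm_of_pairwise _ _ (List.Perm.refl _)
              (by simp [String.le_iff_toList_le.mp hlt.le])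
          by_cases hxw : x = "Wild"
          · subst hxw
            simp [pvA, pvB, hs, PySem.Set.ofList, PySem.Set.add, PySem.Set.contains,
              PySem.List.pyGetD, PySem.List.pyGet?, PySem.List.pyIdx?, hxy, Ne.symm hxy,
              pvScores_big y hlt]
          · simp [pvA, pvB, hs, PySem.Set.ofList, PySem.Set.add, PySem.Set.contains,
              PySem.List.pyGetD, PySem.List.pyGet?, PySem.List.pyIdx?, hxy, Ne.symm hxy, hxw]
        · have hs : PySem.List.sorted [x, y, y] (fun s : String => s) false = [y, y, x] :=
            PySem.List.sorted_id_eq_of_perm_of_pairwise _ _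
              (by simpa using List.perm_append_comm (l₁ := [y, y]) (l₂ := [x]))
              (by simp [String.le_iff_toList_le.mp hgt.le])
          by_cases hxw : x = "Wild"
          · subst hxw
            simp [pvA, pvB, hs, PySem.Set.ofList, PySem.Set.add, PySem.Set.contains,
              PySem.List.pyGetD, PySem.List.pyGet?, PySem.List.pyIdx?, hxy, Ne.symm hxy]
          · simp [pvA, pvB, hs, PySem.Set.ofList, PySem.Set.add, PySem.Set.contains,
              PySem.List.pyGetD, PySem.List.pyGet?, PySem.List.pyIdx?, hxy, Ne.symm hxy, hxw]
      · -- all distinct : both return 0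
        have hB : pvB x y z = 0 := by simp [pvB, hxy, hxz, hyz]
        rw [hB]
        rcases lt_or_gt_of_ne hxy with hl1 | hg1 <;> rcases lt_or_gt_of_ne hyz with hl2 | hg2
        · have hs : PySem.List.sorted [x, y, z] (fun s : String => s) false = [x, y, z] :=
            PySem.List.sorted_id_eq_of_perm_of_pairwise _ _ (List.Perm.refl _)
              (by simp [String.le_iff_toList_le.mp hl1.le, String.le_iff_toList_le.mp hl2.le,
                String.le_iff_toList_le.mp (hl1.trans hl2).le])
          simp [pvA, hs, PySem.Set.ofList, PySem.Set.add, PySem.Set.contains,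
            Ne.symm hxy, Ne.symm hxz, Ne.symm hyz]
        · rcases lt_or_gt_of_ne hxz with hl3 | hg3
          · have hs : PySem.List.sorted [x, y, z] (fun s : String => s) false = [x, z, y] :=
              PySem.List.sorted_id_eq_of_perm_of_pairwise _ _
                (List.Perm.cons x (List.Perm.swap y z []))
                (by simp [String.le_iff_toList_le.mp hl3.le, String.le_iff_toList_le.mp hg2.le,
                  String.le_iff_toList_le.mp hl1.le])
            simp [pvA, hs, PySem.Set.ofList, PySem.Set.add, PySem.Set.contains,
              Ne.symm hxy, Ne.symm hxz, hyz]
          · have hs : PySem.List.sorted [x, y, z] (fun s : String => s) false = [z, x, y] :=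
              PySem.List.sorted_id_eq_of_perm_of_pairwise _ _
                (by simpa using List.perm_append_comm (l₁ := [z]) (l₂ := [x, y]))
                (by simp [String.le_iff_toList_le.mp hg3.le, String.le_iff_toList_le.mp hl1.le,
                  String.le_iff_toList_le.mp hg2.le])
            simp [pvA, hs, PySem.Set.ofList, PySem.Set.add, PySem.Set.contains,
              hxz, hyz, Ne.symm hxy]
        · rcases lt_or_gt_of_ne hxz with hl3 | hg3
          · have hs : PySem.List.sorted [x, y, z] (fun s : String => s) false = [y, x, z] :=
              PySem.List.sorted_id_eq_of_perm_of_pairwise _ _ (List.Perm.swap x y [z])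
                (by simp [String.le_iff_toList_le.mp hg1.le, String.le_iff_toList_le.mp hl3.le,
                  String.le_iff_toList_le.mp hl2.le])
            simp [pvA, hs, PySem.Set.ofList, PySem.Set.add, PySem.Set.contains,
              hxy, Ne.symm hxz, Ne.symm hyz]
          · have hs : PySem.List.sorted [x, y, z] (fun s : String => s) false = [y, z, x] :=
              PySem.List.sorted_id_eq_of_perm_of_pairwise _ _
                (by simpa using List.perm_append_comm (l₁ := [y, z]) (l₂ := [x]))
                (by simp [String.le_iff_toList_le.mp hl2.le, String.le_iff_toList_le.mp hg3.le,
                  String.le_iff_toList_le.mp hg1.le])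
            simp [pvA, hs, PySem.Set.ofList, PySem.Set.add, PySem.Set.contains,
              hxy, hxz, Ne.symm hyz]
        · have hs : PySem.List.sorted [x, y, z] (fun s : String => s) false = [z, y, x] :=
            PySem.List.sorted_id_eq_of_perm_of_pairwise _ _
              (by simpa using List.reverse_perm [x, y, z])
              (by simp [String.le_iff_toList_le.mp hg2.le, String.le_iff_toList_le.mp hg1.le,
                String.le_iff_toList_le.mp (hg2.trans hg1).le])
          simp [pvA, hs, PySem.Set.ofList, PySem.Set.add, PySem.Set.contains,
            hxy, hxz, hyz]

-- ===== VERDICT (by name: the statement is the Claim_ definition above) =====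
theorem fruit_spec : Claim_equal_fruit := by
  intro reels spins _ _
  unfold Spec_fruit
  rw [fruit_eq_pvA, fruit_alt_eq_pvB, pvAB]
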